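-- pv_equiv track=rewrite | github.com/DevChrisCross/Samuel | Summarizer.py | __build_term_frequency
-- ===== SOURCE A (Python) =====
-- from typing import Callable, Tuple, List, Dict, Set
--
-- def __build_term_frequency(sentences, n_gram: int = 1) -> Tuple[dict, set]:
--     """
--     Feature extractor using the Bag-of-Words model
--     """
--     # initialize word_dictionary set
--     word_dictionary = set()
--     for sentence in sentences:
--         for i in range(len(sentence) - n_gram + 1):
--             word = ""
--             for j in range(n_gram):
--                 word += sentence[i + j]
--                 if j != n_gram - 1:
--                     word += " "
--             word_dictionary.add(word)
--
--     # count the frequency with the corresponding n-gram model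
--     word_vector = {i: {word: 0 for word in word_dictionary} for i in range(len(sentences))}
--     for i in range(len(sentences)):
--         for j in range(len(sentences[i]) - n_gram + 1):
--             word = ""
--             for k in range(n_gram):
--                 word += sentences[i][j + k]
--                 if k != n_gram - 1:
--                     word += " "
--             word_vector[i][word] += 1
--     return word_vector, word_dictionary
-- ===== SOURCE B (Python) =====
-- def __build_term_frequency(sentences, n_gram: int = 1):
--     # Count-then-densify: sparse per-sentence counters first, then one dense
--     # vector per sentence over the accumulated vocabulary.
--     counters = []
--     for sentence in sentences:
--         counts = {}
--         for i in range(len(sentence) - n_gram + 1):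
--             word = " ".join(sentence[i + j] for j in range(n_gram))
--             counts[word] = counts.get(word, 0) + 1
--         counters.append(counts)
--     vocabulary = set()
--     for counts in counters:
--         vocabulary.update(counts)
--     word_vector = {i: {word: counts.get(word, 0) for word in vocabulary}
--                    for i, counts in enumerate(counters)}
--     return word_vector, vocabulary
-- ===== Notes on version B (the rewrite author's own statement) =====
-- stated objective: simpler
-- what changed: B counts each sentence's n-grams (built with ' '.join) into a sparse per-sentence dict, takes the vocabulary as the union of those counters' keys, and only then densifies each vector with get(word, 0), instead of A's zero-filling a dense vector per sentence over the vocabulary and then re-scanning every sentence to increment.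
import Mathlib
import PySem

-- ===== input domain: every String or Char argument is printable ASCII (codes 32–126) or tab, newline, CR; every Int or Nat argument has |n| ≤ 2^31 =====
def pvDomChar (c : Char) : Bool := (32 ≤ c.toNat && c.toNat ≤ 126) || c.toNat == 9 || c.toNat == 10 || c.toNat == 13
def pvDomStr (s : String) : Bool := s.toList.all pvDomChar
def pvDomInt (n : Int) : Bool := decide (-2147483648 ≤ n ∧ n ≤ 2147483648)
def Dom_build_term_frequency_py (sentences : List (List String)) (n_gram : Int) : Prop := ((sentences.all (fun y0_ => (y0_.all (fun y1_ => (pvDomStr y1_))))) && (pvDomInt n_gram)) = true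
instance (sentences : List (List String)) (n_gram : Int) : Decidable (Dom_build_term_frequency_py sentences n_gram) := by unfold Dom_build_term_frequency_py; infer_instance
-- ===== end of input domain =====

-- B replaces A's zero-fill-then-increment pass with sparse per-sentence n-gram counters that are
-- densified over the vocabulary at the end (objective: simpler); return values proved equal.

-- ===== PORT A =====
-- A's inner word-building loop (word += sentence[i + j]; word += " " unless last), over List Char.
-- pyGetD's default "" is never used: the enclosing loop bounds keep i + j in range, so this is exact.
def pvWordA (s : List String) (n : Int) (i : Int) : List Char :=
  (PySem.List.pyRange 0 n 1).foldl
    (fun word j =>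
      let word := word ++ (PySem.List.pyGetD s (i + j) "").toList
      if j ≠ n - 1 then word ++ [' '] else word) []

-- first loop: word_dictionary = set(); for sentence in sentences: for i in range(...): add
def pvDictA (sentences : List (List String)) (n_gram : Int) : PySem.Set String :=
  sentences.foldl
    (fun wd sentence =>
      (PySem.List.pyRange 0 ((sentence.length : Int) - n_gram + 1) 1).foldl
        (fun wd i => PySem.Set.add wd (String.ofList (pvWordA sentence n_gram i))) wd)
    PySem.Set.empty

-- {word: 0 for word in word_dictionary}
def pvZeroVec (wd : PySem.Set String) : PySem.Dict String Int :=
  wd.foldl (fun d w => d.insert w 0) PySem.Dict.empty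

-- word_vector comprehension, then the counting loop; word_vector[i][word] += 1 is a nested
-- Dict.modify (both keys are always present, so the defaults are never used)
def build_term_frequency_py (sentences : List (List String)) (n_gram : Int) :
    (List (Int × List (String × Int))) × List String :=
  let word_dictionary := pvDictA sentences n_gram
  let word_vector : PySem.Dict Int (PySem.Dict String Int) :=
    (PySem.List.pyRange 0 (sentences.length : Int) 1).foldl
      (fun wv i => wv.insert i (pvZeroVec word_dictionary)) PySem.Dict.empty
  let word_vector :=
    (PySem.List.pyRange 0 (sentences.length : Int) 1).foldl
      (fun wv i =>
        let sent := PySem.List.pyGetD sentences i []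
        (PySem.List.pyRange 0 ((sent.length : Int) - n_gram + 1) 1).foldl
          (fun wv j =>
            wv.modify i PySem.Dict.empty
              (fun inner => inner.modify (String.ofList (pvWordA sent n_gram j)) 0 (· + 1))) wv)
      word_vector
  (word_vector.items.map (fun p => (p.1, p.2.items)), word_dictionary)

-- ===== PORT B =====
-- " ".join(sentence[i + j] for j in range(n_gram)); pyGetD's default is never used (in range).
def pvWordB (s : List String) (n : Int) (i : Int) : List Char :=
  PySem.Chars.join [' ']
    ((PySem.List.pyRange 0 n 1).map (fun j => (PySem.List.pyGetD s (i + j) "").toList))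

-- counts = {}; for i in range(...): counts[word] = counts.get(word, 0) + 1
def pvCounter (sentence : List String) (n : Int) : PySem.Dict String Int :=
  (PySem.List.pyRange 0 ((sentence.length : Int) - n + 1) 1).foldl
    (fun counts i =>
      let word := String.ofList (pvWordB sentence n i)
      counts.insert word (counts.getD word 0 + 1))
    PySem.Dict.empty

def build_term_frequency_py_alt (sentences : List (List String)) (n_gram : Int) :
    (List (Int × List (String × Int))) × List String :=
  let counters : List (PySem.Dict String Int) := sentences.map (fun s => pvCounter s n_gram)
  let vocabulary : PySem.Set String :=
    counters.foldl (fun v c => PySem.Set.update v c.keys) PySem.Set.empty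
  let word_vector :=
    (PySem.List.enumerate counters).map
      (fun p => (p.1, vocabulary.map (fun w => (w, p.2.getD w 0))))
  (word_vector, vocabulary)

-- ===== PRECONDITION & SPEC =====
def Spec_build_term_frequency_py (sentences : List (List String)) (n_gram : Int) (out : (List (Int × List (String × Int))) × List String) : Prop := out = build_term_frequency_py_alt sentences n_gram
instance (sentences : List (List String)) (n_gram : Int) (out : (List (Int × List (String × Int))) × List String) : Decidable (Spec_build_term_frequency_py sentences n_gram out) := by unfold Spec_build_term_frequency_py; infer_instance

-- ===== CLAIM (what is proved, stated in full; the proofs are below) =====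
def Claim_equal_build_term_frequency_py : Prop := ∀ (sentences : List (List String)) (n_gram : Int), Dom_build_term_frequency_py sentences n_gram → Spec_build_term_frequency_py sentences n_gram (build_term_frequency_py sentences n_gram)

-- ===== LEMMAS AND PROOFS =====

-- the n-gram strings of one sentence / of all sentences, in order (B's word builder)
def pvNgrams (s : List String) (n : Int) : List String :=
  (PySem.List.pyRange 0 ((s.length : Int) - n + 1) 1).map (fun i => String.ofList (pvWordB s n i))

def pvAllNgrams (sentences : List (List String)) (n : Int) : List String :=
  sentences.flatMap (fun s => pvNgrams s n)

theorem pvPyRange_zero_int (n : Int) :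
    PySem.List.pyRange 0 n 1 = (List.range n.toNat).map (fun k : Nat => (k : Int)) := by
  by_cases h : 0 < n
  · have hn : n = (n.toNat : Int) := (Int.toNat_of_nonneg (le_of_lt h)).symm
    conv_lhs => rw [hn]
    exact PySem.List.pyRange_zero_natCast n.toNat
  · have h0 : n.toNat = 0 := by omega
    rw [h0]
    simp [PySem.List.pyRange, h]

-- closed form of A's fold

theorem pvFoldA_closed' (t : Int → List Char) (c : Int → Prop) [DecidablePred c] :
    ∀ (l : List Int) (acc : List Char),
      l.foldl (fun w j => let w' := w ++ t j; if c j then w' ++ [' '] else w') acc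
        = acc ++ (l.map (fun j => t j ++ if c j then [' '] else [])).flatten := by
  intro l
  induction l with
  | nil => simp
  | cons x xs ih =>
    intro acc
    simp only [List.foldl_cons, List.map_cons, List.flatten_cons, ih]
    by_cases h : c x <;> simp [h]

theorem pvJoin_append_singleton (sep y : List Char) :
    ∀ (xs : List (List Char)), xs ≠ [] →
      PySem.Chars.join sep (xs ++ [y]) = PySem.Chars.join sep xs ++ sep ++ y := by
  intro xs
  induction xs with
  | nil => intro h; exact absurd rfl h
  | cons a xs ih =>
    intro _
    cases xs with
    | nil => simp [PySem.Chars.join_cons_cons, PySem.Chars.join_singleton]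
    | cons b xs =>
      have := ih (by simp)
      simp only [List.cons_append, PySem.Chars.join_cons_cons] at this ⊢
      rw [this]
      simp [List.append_assoc]

theorem pvJoin_range (g : Nat → List Char) :
    ∀ m : Nat, PySem.Chars.join [' '] ((List.range (m+1)).map g)
      = ((List.range m).map (fun k => g k ++ [' '])).flatten ++ g m := by
  intro m
  induction m with
  | zero => simp [PySem.Chars.join_singleton]
  | succ m ih =>
    rw [List.range_succ (n := m + 1), List.map_append, List.map_singleton]
    rw [pvJoin_append_singleton _ _ _ (by simp [List.range_succ])]
    rw [ih, List.range_succ (n := m), List.map_append, List.flatten_append]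
    simp [List.append_assoc]

-- closed form with Prop condition

theorem pvWordA_eq_pvWordB (s : List String) (n : Int) (i : Int) :
    pvWordA s n i = pvWordB s n i := by
  unfold pvWordA pvWordB
  rw [pvPyRange_zero_int]
  rcases hm : n.toNat with _ | m
  · simp [PySem.Chars.join_nil]
  · have hn : n = (m : Int) + 1 := by omega
    rw [pvFoldA_closed' (fun j => (PySem.List.pyGetD s (i + j) "").toList) (fun j => j ≠ n - 1)]
    rw [List.map_map, List.map_map, List.nil_append]
    set g : Nat → List Char := fun k => (PySem.List.pyGetD s (i + (k : Int)) "").toList with hg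
    have hcong : (List.range (m+1)).map
        ((fun j => (PySem.List.pyGetD s (i + j) "").toList ++ if j ≠ n - 1 then [' '] else []) ∘ (fun k : Nat => (k : Int)))
        = (List.range (m+1)).map (fun k => g k ++ if k ≠ m then [' '] else []) := by
      apply List.map_congr_left
      intro k hk
      simp only [Function.comp_apply, hg]
      congr 1
      have : ((k : Int) ≠ n - 1) ↔ (k ≠ m) := by omega
      simp only [this]
    have hrhs : (List.range (m+1)).map ((fun j => (PySem.List.pyGetD s (i + j) "").toList) ∘ (fun k : Nat => (k : Int))) = (List.range (m+1)).map g := rfl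
    rw [hcong, hrhs, pvJoin_range g m]
    rw [List.range_succ, List.map_append, List.flatten_append]
    simp only [List.map_singleton, List.flatten_cons, List.flatten_nil]
    have hcong2 : (List.range m).map (fun k => g k ++ if k ≠ m then [' '] else [])
        = (List.range m).map (fun k => g k ++ [' ']) := by
      apply List.map_congr_left
      intro k hk
      have : k ≠ m := by simp at hk; omega
      simp [this]
    rw [hcong2]
    simp

-- Set lemmas

theorem pvUpdate_add {α : Type} [BEq α] [LawfulBEq α] (s t : PySem.Set α) (x : α) :
    PySem.Set.update s (PySem.Set.add t x) = PySem.Set.add (PySem.Set.update s t) x := by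
  by_cases h : x ∈ t
  · rw [PySem.Set.add_of_mem h, PySem.Set.add_of_mem]
    exact (PySem.Set.mem_update s t x).mpr (Or.inr h)
  · rw [PySem.Set.add_of_not_mem h]
    show List.foldl PySem.Set.add s (t ++ [x]) = _
    rw [List.foldl_append]
    rfl

theorem pvUpdate_update {α : Type} [BEq α] [LawfulBEq α] (s : PySem.Set α) :
    ∀ (xs : List α) (t : PySem.Set α),
      PySem.Set.update s (PySem.Set.update t xs) = PySem.Set.update (PySem.Set.update s t) xs := by
  intro xs
  induction xs with
  | nil => intro t; rfl
  | cons x xs ih =>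
    intro t
    show PySem.Set.update s (PySem.Set.update (PySem.Set.add t x) xs) = _
    rw [ih (PySem.Set.add t x)]
    rw [pvUpdate_add]
    rfl

theorem pvUpdate_ofList {α : Type} [BEq α] [LawfulBEq α] (s : PySem.Set α) (xs : List α) :
    PySem.Set.update s (PySem.Set.ofList xs) = PySem.Set.update s xs := by
  have h1 : PySem.Set.ofList xs = PySem.Set.update PySem.Set.empty xs := by
    rw [PySem.Set.ofList_eq_foldl]; rfl
  rw [h1, pvUpdate_update]
  rfl

theorem pvUpdate_subset {α : Type} [BEq α] [LawfulBEq α] (xs : List α) :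
    ∀ (s : PySem.Set α), (∀ x ∈ xs, x ∈ s) → PySem.Set.update s xs = s := by
  induction xs with
  | nil => intro s _; rfl
  | cons x xs ih =>
    intro s h
    show PySem.Set.update (PySem.Set.add s x) xs = s
    rw [PySem.Set.add_of_mem (h x (by simp))]
    exact ih s (fun y hy => h y (by simp [hy]))

theorem pvCounter_eq (s : List String) (n : Int) :
    pvCounter s n = PySem.Dict.counter (pvNgrams s n) := by
  unfold pvCounter pvNgrams
  rw [← PySem.Dict.foldl_insert_getD_add_one_eq_counter, List.foldl_map]

theorem pvDictA_eq_ofList (sentences : List (List String)) (n : Int) :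
    pvDictA sentences n = PySem.Set.ofList (pvAllNgrams sentences n) := by
  unfold pvDictA pvAllNgrams
  rw [PySem.Set.ofList_eq_foldl, List.foldl_flatMap]
  have : ∀ (wd : PySem.Set String) (sentence : List String),
      (PySem.List.pyRange 0 ((sentence.length : Int) - n + 1) 1).foldl
        (fun wd i => PySem.Set.add wd (String.ofList (pvWordA sentence n i))) wd
      = (pvNgrams sentence n).foldl PySem.Set.add wd := by
    intro wd sentence
    unfold pvNgrams
    rw [List.foldl_map]
    simp only [pvWordA_eq_pvWordB]
  simp only [this]
  rfl

theorem pvVocabB_eq (sentences : List (List String)) (n : Int) :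
    (sentences.map (fun s => pvCounter s n)).foldl
        (fun v c => PySem.Set.update v c.keys) PySem.Set.empty
      = PySem.Set.ofList (pvAllNgrams sentences n) := by
  rw [List.foldl_map]
  simp only [pvCounter_eq, PySem.Dict.keys_counter, pvUpdate_ofList]
  rw [PySem.Set.ofList_eq_foldl]
  unfold pvAllNgrams
  rw [List.foldl_flatMap]
  rfl

-- generic dict fold lemmas

theorem pvGetD_foldl_insert_const {κ ν : Type} [BEq κ] [LawfulBEq κ] (v e : ν) :
    ∀ (l : List κ) (d : PySem.Dict κ ν) (k : κ),
      (l.foldl (fun d i => d.insert i v) d).getD k e = if k ∈ l then v else d.getD k e := by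
  intro l
  induction l with
  | nil => simp
  | cons x xs ih =>
    intro d k
    simp only [List.foldl_cons, ih]
    by_cases h : k = x
    · subst h
      by_cases hm : k ∈ xs <;> simp [hm, PySem.Dict.getD_insert_self]
    · by_cases hm : k ∈ xs <;> simp [hm, h, PySem.Dict.getD_insert_of_ne _ _ _ h]

theorem pvGetD_inner_fold_ne {σ : Type} {κ ν : Type} [BEq κ] [LawfulBEq κ] (e : ν)
    (f : σ → ν → ν) (i : κ) :
    ∀ (ws : List σ) (wv : PySem.Dict κ ν) (k : κ), k ≠ i →
      (ws.foldl (fun wv w => wv.modify i e (f w)) wv).getD k e = wv.getD k e := by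
  intro ws
  induction ws with
  | nil => intro wv k h; rfl
  | cons w ws ih =>
    intro wv k h
    simp only [List.foldl_cons, ih _ _ h, PySem.Dict.getD_modify_of_ne _ _ _ h]

theorem pvGetD_inner_fold_self {σ : Type} {κ ν : Type} [BEq κ] [LawfulBEq κ] (e : ν)
    (f : σ → ν → ν) (i : κ) :
    ∀ (ws : List σ) (wv : PySem.Dict κ ν),
      (ws.foldl (fun wv w => wv.modify i e (f w)) wv).getD i e
        = ws.foldl (fun d w => f w d) (wv.getD i e) := by
  intro ws
  induction ws with
  | nil => intro wv; rfl
  | cons w ws ih =>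
    intro wv
    simp only [List.foldl_cons, ih, PySem.Dict.getD_modify_self]

theorem pvGetD_outer_fold_not_mem {σ : Type} {κ ν : Type} [BEq κ] [LawfulBEq κ] (e : ν)
    (ws : κ → List σ) (f : κ → σ → ν → ν) :
    ∀ (is : List κ) (wv : PySem.Dict κ ν) (k : κ), k ∉ is →
      (is.foldl (fun wv i => (ws i).foldl (fun wv w => wv.modify i e (f i w)) wv) wv).getD k e
        = wv.getD k e := by
  intro is
  induction is with
  | nil => intro wv k _; rfl
  | cons i is ih =>
    intro wv k h
    simp only [List.mem_cons, not_or] at h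
    simp only [List.foldl_cons, ih _ _ h.2, pvGetD_inner_fold_ne e (f i) i (ws i) wv k h.1]

theorem pvGetD_outer_fold {σ : Type} {κ ν : Type} [BEq κ] [LawfulBEq κ] (e : ν)
    (ws : κ → List σ) (f : κ → σ → ν → ν) :
    ∀ (is : List κ) (wv : PySem.Dict κ ν) (k : κ), is.Nodup → k ∈ is →
      (is.foldl (fun wv i => (ws i).foldl (fun wv w => wv.modify i e (f i w)) wv) wv).getD k e
        = (ws k).foldl (fun d w => f k w d) (wv.getD k e) := by
  intro is
  induction is with
  | nil => intro wv k _ h; simp at h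
  | cons i is ih =>
    intro wv k hnd hk
    simp only [List.nodup_cons] at hnd
    simp only [List.foldl_cons]
    rcases List.mem_cons.mp hk with h | h
    · subst h
      rw [pvGetD_outer_fold_not_mem e ws f is _ k hnd.1]
      exact pvGetD_inner_fold_self e (f k) k (ws k) wv
    · rw [ih _ _ hnd.2 h]
      have hne : k ≠ i := fun hkeq => hnd.1 (hkeq ▸ h)
      rw [pvGetD_inner_fold_ne e (f i) i (ws i) wv k hne]

theorem pvKeys_inner_fold {σ κ ν : Type} [BEq κ] [LawfulBEq κ] (e : ν) (f : σ → ν → ν) (i : κ)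
    (ws : List σ) (wv : PySem.Dict κ ν) (h : i ∈ wv.keys) :
    (ws.foldl (fun wv w => wv.modify i e (f w)) wv).keys = wv.keys := by
  rw [PySem.Dict.keys_foldl_modify_key ws (fun _ => i) e (fun _ w => f w) wv]
  exact pvUpdate_subset _ _ (by intro x hx; simp at hx; rcases hx with ⟨-, rfl⟩; exact h)

theorem pvKeys_outer_fold {σ κ ν : Type} [BEq κ] [LawfulBEq κ] (e : ν)
    (ws : κ → List σ) (f : κ → σ → ν → ν) :
    ∀ (is : List κ) (wv : PySem.Dict κ ν), (∀ i ∈ is, i ∈ wv.keys) →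
      (is.foldl (fun wv i => (ws i).foldl (fun wv w => wv.modify i e (f i w)) wv) wv).keys
        = wv.keys := by
  intro is
  induction is with
  | nil => intro wv _; rfl
  | cons i is ih =>
    intro wv h
    simp only [List.foldl_cons]
    have hk : (((ws i).foldl (fun wv w => wv.modify i e (f i w)) wv)).keys = wv.keys :=
      pvKeys_inner_fold e (f i) i (ws i) wv (h i (by simp))
    rw [ih _ (by intro x hx; rw [hk]; exact h x (by simp [hx])), hk]

theorem pvZeroVec_getD {κ : Type} [BEq κ] [LawfulBEq κ] (w : κ) :
    ∀ (l : List κ) (d : PySem.Dict κ Int), d.getD w 0 = 0 →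
      (l.foldl (fun d w' => d.insert w' 0) d).getD w 0 = 0 := by
  intro l
  induction l with
  | nil => intro d h; exact h
  | cons x xs ih =>
    intro d h
    simp only [List.foldl_cons]
    apply ih
    by_cases hx : w = x
    · subst hx; exact PySem.Dict.getD_insert_self d w 0 0
    · rw [PySem.Dict.getD_insert_of_ne _ _ _ hx]; exact h

theorem pvZeroVec_keys (V : PySem.Set String) (h : V.Nodup) : (pvZeroVec V).keys = V := by
  unfold pvZeroVec
  rw [PySem.Dict.keys_foldl_insert V (fun _ _ => 0) PySem.Dict.empty]
  rw [PySem.Dict.keys_empty]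
  show List.foldl PySem.Set.add [] V = V
  rw [← PySem.Set.ofList_eq_foldl]
  exact PySem.Set.ofList_eq_self_of_nodup V h

theorem pvZeroVec_getD_zero (V : PySem.Set String) (w : String) : (pvZeroVec V).getD w 0 = 0 :=
  pvZeroVec_getD w V PySem.Dict.empty (PySem.Dict.getD_empty w 0)

theorem pvGetD_map_lt {α β : Type} (f : α → β) (l : List α) (k : Nat) (e : β) (d : α)
    (hk : k < l.length) : (l.map f).getD k e = f (l.getD k d) := by
  rw [List.getD_eq_getElem?_getD, List.getD_eq_getElem?_getD, List.getElem?_map,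
    List.getElem?_eq_getElem hk]
  simp

theorem pvEnum_map {α β : Type} (F : Int × α → β) (dflt : α) :
    ∀ (l : List α) (s : Int),
      (PySem.List.enumerate l s).map F
        = (List.range l.length).map (fun k : Nat => F (s + (k : Int), l.getD k dflt)) := by
  intro l
  induction l with
  | nil => intro s; simp [PySem.List.enumerate]
  | cons x xs ih =>
    intro s
    show F (s, x) :: (PySem.List.enumerate xs (s + 1)).map F = _
    rw [ih (s + 1), List.length_cons, List.range_succ_eq_map, List.map_cons, List.map_map]
    congr 1
    · congr 1; simp
    · apply List.map_congr_left
      intro k _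
      simp only [Function.comp_apply, List.getD_cons_succ]
      congr 2
      push_cast
      ring

theorem pvMain_eq (sentences : List (List String)) (n_gram : Int) :
    build_term_frequency_py sentences n_gram = build_term_frequency_py_alt sentences n_gram := by
  unfold build_term_frequency_py build_term_frequency_py_alt
  simp only [pvDictA_eq_ofList, pvVocabB_eq]
  set n := n_gram
  set V : PySem.Set String := PySem.Set.ofList (pvAllNgrams sentences n) with hV
  have hVnd : V.Nodup := PySem.Set.nodup_ofList _
  set L := sentences.length with hL
  have hR : PySem.List.pyRange 0 (L : Int) 1 = (List.range L).map (fun k : Nat => (k : Int)) := by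
    rw [pvPyRange_zero_int]; simp
  have hRnd : ((List.range L).map (fun k : Nat => (k : Int))).Nodup :=
    (List.nodup_range).map (fun a b => by omega)
  rw [hR]
  refine Prod.ext ?_ rfl
  show _ = _
  simp only []
  -- name the pieces
  set R : List Int := (List.range L).map (fun k : Nat => (k : Int)) with hRdef
  set ws : Int → List Int := fun i =>
    PySem.List.pyRange 0 ((((PySem.List.pyGetD sentences i []).length : Int)) - n + 1) 1 with hws
  set f : Int → Int → PySem.Dict String Int → PySem.Dict String Int := fun i j =>
    fun inner => inner.modify (String.ofList (pvWordA (PySem.List.pyGetD sentences i []) n j)) 0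
      (fun x => x + 1) with hf
  set wv0 : PySem.Dict Int (PySem.Dict String Int) :=
    R.foldl (fun wv i => wv.insert i (pvZeroVec V)) PySem.Dict.empty with hwv0
  have hwv0keys : wv0.keys = R := by
    rw [hwv0, PySem.Dict.keys_foldl_insert R (fun _ _ => pvZeroVec V) PySem.Dict.empty,
      PySem.Dict.keys_empty]
    show List.foldl PySem.Set.add [] R = R
    rw [← PySem.Set.ofList_eq_foldl]
    exact PySem.Set.ofList_eq_self_of_nodup R hRnd
  have hstep : (fun (wv : PySem.Dict Int (PySem.Dict String Int)) (i : Int) =>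
      List.foldl (fun wv j => wv.modify i PySem.Dict.empty (fun inner =>
        inner.modify (String.ofList (pvWordA (PySem.List.pyGetD sentences i []) n j)) 0
          (fun x => x + 1))) wv (ws i))
      = (fun wv i => (ws i).foldl (fun wv w => wv.modify i PySem.Dict.empty (f i w)) wv) := rfl
  rw [hstep]
  set final : PySem.Dict Int (PySem.Dict String Int) :=
    R.foldl (fun wv i => (ws i).foldl (fun wv w => wv.modify i PySem.Dict.empty (f i w)) wv) wv0
    with hfinal
  have hfkeys : final.keys = R := by
    rw [hfinal, pvKeys_outer_fold PySem.Dict.empty ws f R wv0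
      (by intro i hi; rw [hwv0keys]; exact hi)]
    exact hwv0keys
  have hfnd : final.keys.Nodup := by rw [hfkeys]; exact hRnd
  rw [PySem.Dict.items_eq_map_keys final hfnd PySem.Dict.empty, hfkeys]
  rw [List.map_map]
  -- B side
  rw [pvEnum_map _ (PySem.Dict.empty : PySem.Dict String Int) (sentences.map (fun s => pvCounter s n)) 0]
  rw [List.length_map]
  rw [hRdef, List.map_map]
  apply List.map_congr_left
  intro k hk
  have hkL : k < L := List.mem_range.mp hk
  have hmem : ((k : Int)) ∈ R := by rw [hRdef]; exact List.mem_map_of_mem hk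
  simp only [Function.comp_apply]
  have hgetD : final.getD (k : Int) PySem.Dict.empty
      = (ws (k : Int)).foldl (fun d w => f (k : Int) w d) (wv0.getD (k : Int) PySem.Dict.empty) := by
    rw [hfinal]
    exact pvGetD_outer_fold PySem.Dict.empty ws f R wv0 (k : Int) hRnd hmem
  have hwv0get : wv0.getD (k : Int) PySem.Dict.empty = pvZeroVec V := by
    rw [hwv0, pvGetD_foldl_insert_const (pvZeroVec V) PySem.Dict.empty R PySem.Dict.empty (k : Int),
      if_pos hmem]
  set sent : List String := sentences.getD k [] with hsent
  have hsent' : PySem.List.pyGetD sentences (k : Int) [] = sent := by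
    rw [PySem.List.pyGetD_natCast]
  have hsentmem : sent ∈ sentences := by
    rw [hsent, List.getD_eq_getElem sentences [] (by omega)]
    exact List.getElem_mem _
  have hinner : (ws (k : Int)).foldl (fun d w => f (k : Int) w d) (pvZeroVec V)
      = (pvNgrams sent n).foldl (fun d w => d.modify w 0 (fun x => x + 1)) (pvZeroVec V) := by
    rw [hws, hf]
    simp only [hsent']
    unfold pvNgrams
    rw [List.foldl_map]
    simp only [pvWordA_eq_pvWordB]
  have hsubV : ∀ x ∈ pvNgrams sent n, x ∈ V := by
    intro x hx
    rw [hV]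
    rw [PySem.Set.mem_ofList]
    exact List.mem_flatMap.mpr ⟨sent, hsentmem, hx⟩
  have hinkeys : ((pvNgrams sent n).foldl
      (fun d w => d.modify w 0 (fun x => x + 1)) (pvZeroVec V)).keys = V := by
    rw [PySem.Dict.keys_foldl_modify (pvNgrams sent n) 0 (fun _ _ => (fun x => x + 1)) (pvZeroVec V)]
    rw [pvZeroVec_keys V hVnd]
    exact pvUpdate_subset _ _ hsubV
  have hinnd : ((pvNgrams sent n).foldl
      (fun d w => d.modify w 0 (fun x => x + 1)) (pvZeroVec V)).keys.Nodup := by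
    rw [hinkeys]; exact hVnd
  have hitems : ((pvNgrams sent n).foldl
      (fun d w => d.modify w 0 (fun x => x + 1)) (pvZeroVec V)).items
      = V.map (fun w => (w, ((pvNgrams sent n).count w : Int))) := by
    rw [PySem.Dict.items_eq_map_keys _ hinnd 0, hinkeys]
    apply List.map_congr_left
    intro w _
    have := PySem.Dict.getD_foldl_modify_add_one (pvNgrams sent n) (pvZeroVec V) w
    rw [this, pvZeroVec_getD_zero, zero_add]
  have hcounters : (sentences.map (fun s => pvCounter s n)).getD k PySem.Dict.empty
      = PySem.Dict.counter (pvNgrams sent n) := by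
    rw [pvGetD_map_lt (fun s => pvCounter s n) sentences k PySem.Dict.empty [] (by omega)]
    rw [← hsent, pvCounter_eq]
  rw [hgetD, hwv0get, hinner, hitems, hcounters]
  refine Prod.ext (by simp) ?_
  show _ = _
  simp only []
  apply List.map_congr_left
  intro w _
  rw [PySem.Dict.getD_counter]

-- ===== VERDICT (by name: the statement is the Claim_ definition above) =====
theorem build_term_frequency_py_spec : Claim_equal_build_term_frequency_py := by
  intro sentences n_gram _
  show build_term_frequency_py sentences n_gram = build_term_frequency_py_alt sentences n_gram
  exact pvMain_eq sentences n_gram
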